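-- pv_equiv track=rewrite | github.com/Rahimss/projet | zigzagstr.py | dechiffre_zigzag
-- ===== SOURCE A (Python) =====
-- def dechiffre_zigzag(chiffre_text, k):
--     if k == 1:
--         return chiffre_text
--
--     # nehi lespace
--     positions = [i for i, char in enumerate(chiffre_text) if char == ' ']
--     chiffre_text = chiffre_text.replace(' ', '')
--
--     # nahasbou la longueur de chaque niveau
--     n = len(chiffre_text)
--     zigzag = [[] for i in range(k)]
--     niv_lengths = [0] * k
--     niv = 0
--     direction = 1
--
--     for i in range(n):
--         niv_lengths[niv] += 1
--         if niv == 0: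
--             direction = 1
--         elif niv == k - 1:
--             direction = -1
--         niv += direction
--
--     # n3awdou ndirou zigzag Le9dime ta3 chiffrement
--     index = 0
--     for i in range(k):
--         zigzag[i] = list(chiffre_text[index:index + niv_lengths[i]])
--         index += niv_lengths[i]
--
--     # dechiffrement ta3 zigzag
--     dechiffre_text = []
--     niv = 0
--     direction = 1
--     niv_indices = [0] * k
--
--     for i in range(n):
--         dechiffre_text.append(zigzag[niv][niv_indices[niv]])
--         niv_indices[niv] += 1
--         if niv == 0:
--             direction = 1
--         elif niv == k - 1:
--             direction = -1
--         niv += direction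
--
--     result = ''.join(dechiffre_text)
--
--     # nrej3ou nzidou les espaces
--     for pos in positions:
--         result = result[:pos] + ' ' + result[pos:]
--
--     return result
-- ===== SOURCE B (Python) =====
-- def dechiffre_zigzag(chiffre_text, k):
--     if k == 1:
--         return chiffre_text
--
--     # remember where the spaces were, then drop them
--     positions = [i for i, char in enumerate(chiffre_text) if char == ' ']
--     chiffre_text = chiffre_text.replace(' ', '')
--     n = len(chiffre_text)
--
--     # rail index of every position in the plaintext (same bounce rule)
--     pattern = []
--     niv = 0
--     direction = 1
--     for i in range(n):
--         pattern.append(niv)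
--         if niv == 0:
--             direction = 1
--         elif niv == k - 1:
--             direction = -1
--         niv += direction
--
--     # the encryption read order: positions grouped rail by rail
--     buckets = [[] for r in range(k)]
--     for i, r in enumerate(pattern):
--         buckets[r].append(i)
--     order = []
--     for b in buckets:
--         order += b
--
--     # invert that permutation: cipher char j goes back to position order[j]
--     result = [''] * n
--     for j, orig in enumerate(order):
--         result[orig] = chiffre_text[j]
--
--     # put the spaces back
--     for pos in positions:
--         result.insert(pos, ' ')
--
--     return ''.join(result)
-- ===== Notes on version B (the rewrite author's own statement) =====
-- stated objective: alternative
-- what changed: A splits the cipher text into per-rail segments and replays the zigzag walk with per-rail cursors to rebuild the plaintext; B instead computes the rail pattern once, derives the encryption read order as an explicit permutation (position indices grouped rail by rail) and inverts it with a single scatter pass, then reinserts spaces by list insertion instead of string slicing.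
import Mathlib
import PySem

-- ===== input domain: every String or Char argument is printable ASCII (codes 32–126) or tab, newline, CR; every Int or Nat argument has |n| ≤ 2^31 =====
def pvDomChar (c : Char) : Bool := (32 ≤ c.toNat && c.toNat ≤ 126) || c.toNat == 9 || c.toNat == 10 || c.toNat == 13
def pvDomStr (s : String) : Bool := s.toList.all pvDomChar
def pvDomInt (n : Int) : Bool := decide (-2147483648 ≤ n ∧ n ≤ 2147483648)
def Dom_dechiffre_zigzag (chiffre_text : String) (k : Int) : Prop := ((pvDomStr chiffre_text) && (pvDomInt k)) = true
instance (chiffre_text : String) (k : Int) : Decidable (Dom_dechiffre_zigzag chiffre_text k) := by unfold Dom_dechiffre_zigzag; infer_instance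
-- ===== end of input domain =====

-- B replaces A's split-into-rail-buckets-and-replay decryption by computing the encryption
-- read order as an explicit permutation (indices grouped rail by rail) and inverting it with
-- one scatter pass; same cost, different algorithm ('alternative').

-- ===== PORT A =====
-- A's rail-counting loop: lengths[niv] += 1, bounce direction, move niv.
def pvA_count_step (k : Int) (st : List Int × Int × Int) : List Int × Int × Int :=
  let L := st.1
  let niv := st.2.1
  let dir := st.2.2
  let L' := PySem.List.pySetD L niv (PySem.List.pyGetD L niv 0 + 1)
  let dir' := if niv = 0 then 1 else if niv = k - 1 then -1 else dir
  (L', niv + dir', dir')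

-- A's rail-splitting loop: zigzag[i] = list(text[index:index+niv_lengths[i]]); index += niv_lengths[i].
def pvA_split_step (t : List Char) (L : List Int) (st : List (List Char) × Int) (i : Int) :
    List (List Char) × Int :=
  let z := st.1
  let index := st.2
  (PySem.List.pySetD z i (PySem.List.slice t (some index) (some (index + PySem.List.pyGetD L i 0))),
   index + PySem.List.pyGetD L i 0)

-- A's replay loop: append zigzag[niv][niv_indices[niv]], bump niv_indices[niv], bounce, move niv.
def pvA_dec_step (k : Int) (zig : List (List Char)) (st : List Char × List Int × Int × Int) :
    List Char × List Int × Int × Int :=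
  let acc := st.1
  let idxs := st.2.1
  let niv := st.2.2.1
  let dir := st.2.2.2
  let acc' := acc ++ [PySem.List.pyGetD (PySem.List.pyGetD zig niv []) (PySem.List.pyGetD idxs niv 0) ' ']
  let idxs' := PySem.List.pySetD idxs niv (PySem.List.pyGetD idxs niv 0 + 1)
  let dir' := if niv = 0 then 1 else if niv = k - 1 then -1 else dir
  (acc', idxs', niv + dir', dir')

def dechiffre_zigzag (chiffre_text : String) (k : Int) : String :=
  if k = 1 then chiffre_text else
    let cs := chiffre_text.toList
    let positions : List Int :=
      (PySem.List.enumerate cs 0).foldl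
        (fun acc p => if p.2 = ' ' then acc ++ [p.1] else acc) []
    let t := PySem.Chars.replace cs [' '] []
    let n := t.length
    let lengths0 : List Int := List.replicate k.toNat 0
    let st1 := (PySem.List.pyRange 0 (n : Int)).foldl (fun st _ => pvA_count_step k st)
      (lengths0, 0, 1)
    let L := st1.1
    let zigzag0 : List (List Char) := (PySem.List.pyRange 0 k).map (fun _ => [])
    let st2 := (PySem.List.pyRange 0 k).foldl (pvA_split_step t L) (zigzag0, 0)
    let zig := st2.1
    let st3 := (PySem.List.pyRange 0 (n : Int)).foldl (fun st _ => pvA_dec_step k zig st)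
      ([], List.replicate k.toNat 0, 0, 1)
    let res := st3.1
    let final := positions.foldl
      (fun r pos => PySem.List.slice r none (some pos) ++ [' '] ++ PySem.List.slice r (some pos) none)
      res
    String.ofList final

-- ===== PORT B =====
-- B's pattern loop: pattern.append(niv), bounce direction, move niv.
def pvB_pat_step (k : Int) (st : List Int × Int × Int) : List Int × Int × Int :=
  let pat := st.1
  let niv := st.2.1
  let dir := st.2.2
  let pat' := pat ++ [niv]
  let dir' := if niv = 0 then 1 else if niv = k - 1 then -1 else dir
  (pat', niv + dir', dir')

-- B's grouping loop: buckets[r].append(i).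
def pvB_bucket_step (b : List (List Int)) (p : Int × Int) : List (List Int) :=
  PySem.List.pySetD b p.2 (PySem.List.pyGetD b p.2 [] ++ [p.1])

-- B's scatter loop: result[orig] = text[j].
def pvB_scatter_step (t : List Char) (r : List (List Char)) (p : Int × Int) : List (List Char) :=
  PySem.List.pySetD r p.2 [PySem.List.pyGetD t p.1 ' ']

def dechiffre_zigzag_alt (chiffre_text : String) (k : Int) : String :=
  if k = 1 then chiffre_text else
    let cs := chiffre_text.toList
    let positions : List Int :=
      (PySem.List.enumerate cs 0).foldl
        (fun acc p => if p.2 = ' ' then acc ++ [p.1] else acc) []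
    let t := PySem.Chars.replace cs [' '] []
    let n := t.length
    let stp := (PySem.List.pyRange 0 (n : Int)).foldl (fun st _ => pvB_pat_step k st)
      ([], 0, 1)
    let pat := stp.1
    let buckets0 : List (List Int) := (PySem.List.pyRange 0 k).map (fun _ => [])
    let buckets := (PySem.List.enumerate pat 0).foldl pvB_bucket_step buckets0
    let order := buckets.foldl (fun acc b => acc ++ b) []
    let res0 : List (List Char) := List.replicate n []
    let res := (PySem.List.enumerate order 0).foldl (pvB_scatter_step t) res0
    let final := positions.foldl (fun r pos => PySem.List.insert r pos [' ']) res
    String.ofList final.flatten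

-- ===== PRECONDITION & SPEC =====
-- Pre_ excludes k ≤ 0 together with a text containing a non-space character: there the Python A
-- raises IndexError (and the Python B raises IndexError as well); everywhere else A returns.
def Pre_dechiffre_zigzag (chiffre_text : String) (k : Int) : Prop :=
  1 ≤ k ∨ ∀ c ∈ chiffre_text.toList, c = ' '
instance (chiffre_text : String) (k : Int) : Decidable (Pre_dechiffre_zigzag chiffre_text k) := by
  unfold Pre_dechiffre_zigzag; infer_instance

def pvWitness_dechiffre_zigzag : String × Int := ("ab cde f", 3)

def Spec_dechiffre_zigzag (chiffre_text : String) (k : Int) (out : String) : Prop := out = dechiffre_zigzag_alt chiffre_text k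
instance (chiffre_text : String) (k : Int) (out : String) : Decidable (Spec_dechiffre_zigzag chiffre_text k out) := by unfold Spec_dechiffre_zigzag; infer_instance

-- ===== CLAIM (what is proved, stated in full; the proofs are below) =====
def Claim_equal_dechiffre_zigzag : Prop := ∀ (chiffre_text : String) (k : Int), Dom_dechiffre_zigzag chiffre_text k → Pre_dechiffre_zigzag chiffre_text k → Spec_dechiffre_zigzag chiffre_text k (dechiffre_zigzag chiffre_text k)

-- ===== LEMMAS AND PROOFS =====

-- the common zigzag state machine: one step of (niv, direction)
def zzStep (k : Int) (nd : Int × Int) : Int × Int :=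
  let dir' := if nd.1 = 0 then 1 else if nd.1 = k - 1 then -1 else nd.2
  (nd.1 + dir', dir')

-- the rail index of the first n positions, starting from state nd
def patA (k : Int) : Nat → Int × Int → List Int
  | 0, _ => []
  | n+1, nd => nd.1 :: patA k n (zzStep k nd)

def bumpL (L : List Int) (r : Int) : List Int :=
  PySem.List.pySetD L r (PySem.List.pyGetD L r 0 + 1)

-- A's replay, abstracted over the per-rail reader g
def expandZ (g : Int → Int → Char) : List Int → List Int → List Char
  | [], _ => []
  | r :: rest, idxs => g r (PySem.List.pyGetD idxs r 0) :: expandZ g rest (bumpL idxs r)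

theorem patA_length (k : Int) : ∀ (n : Nat) (nd : Int × Int), (patA k n nd).length = n := by
  intro n
  induction n with
  | zero => intro nd; rfl
  | succ m ih => intro nd; simp [patA, ih]

theorem patA_mem (k : Int) (hk : 2 ≤ k) :
    ∀ (n : Nat) (nd : Int × Int), 0 ≤ nd.1 → nd.1 < k → (nd.2 = 1 ∨ nd.2 = -1) →
      ∀ e ∈ patA k n nd, 0 ≤ e ∧ e < k := by
  intro n
  induction n with
  | zero => intro nd _ _ _ e he; simp [patA] at he
  | succ m ih =>
    intro nd h0 h1 h2 e he
    simp only [patA, List.mem_cons] at he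
    rcases he with rfl | he
    · exact ⟨h0, h1⟩
    · refine ih (zzStep k nd) ?_ ?_ ?_ e he
      all_goals simp only [zzStep]
      · split_ifs <;> omega
      · split_ifs <;> omega
      · split_ifs <;> omega

-- count fold: lengths after the counting loop
theorem length_foldl_bumpL : ∀ (pat : List Int) (L : List Int),
    (pat.foldl bumpL L).length = L.length := by
  intro pat
  induction pat with
  | nil => intro L; rfl
  | cons r rest ih => intro L; simp [List.foldl_cons, ih, bumpL, PySem.List.length_pySetD]

theorem getD_foldl_bumpL : ∀ (pat : List Int) (L : List Int)
    (hpat : ∀ e ∈ pat, 0 ≤ e ∧ e < (L.length : Int)) (r : Nat) (hr : r < L.length),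
    PySem.List.pyGetD (pat.foldl bumpL L) (r : Int) 0
      = PySem.List.pyGetD L (r : Int) 0 + (pat.count (r : Int) : Int) := by
  intro pat
  induction pat with
  | nil => intro L _ r hr; simp
  | cons e rest ih =>
    intro L hpat r hr
    have he := hpat e (by simp)
    have hE : e = ((e.toNat : Nat) : Int) := by omega
    have hlen : e.toNat < L.length := by omega
    rw [List.foldl_cons]
    have hrest : ∀ x ∈ rest, 0 ≤ x ∧ x < ((bumpL L e).length : Int) := by
      intro x hx
      have := hpat x (by simp [hx])
      simpa [bumpL, PySem.List.length_pySetD] using this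
    rw [ih (bumpL L e) hrest r (by simpa [bumpL, PySem.List.length_pySetD] using hr)]
    rw [show bumpL L e = bumpL L ((e.toNat : Nat) : Int) by rw [← hE]]
    simp only [bumpL]
    rw [PySem.List.pyGetD_pySetD_natCast _ _ _ _ _ hlen, List.count_cons]
    by_cases hc : r = e.toNat
    · subst hc
      have hb : (e == ((e.toNat : Nat) : Int)) = true := by simp only [beq_iff_eq]; omega
      rw [if_pos rfl, if_pos hb]
      push_cast
      omega
    · have hb : (e == ((r : Nat) : Int)) = false := by
        simp only [beq_eq_false_iff_ne, ne_eq]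
        omega
      rw [if_neg hc, if_neg (by simp [hb])]
      push_cast
      omega

-- ==== loop lemmas: the three niv/direction loops are patA-driven folds ====

theorem countLoop (k : Int) : ∀ (l : List Int) (L : List Int) (nd : Int × Int),
    l.foldl (fun st _ => pvA_count_step k st) (L, nd)
      = ((patA k l.length nd).foldl bumpL L, (zzStep k)^[l.length] nd) := by
  intro l
  induction l with
  | nil => intro L nd; rfl
  | cons x rest ih =>
    intro L nd
    rw [List.foldl_cons]
    show (rest.foldl (fun st _ => pvA_count_step k st) (pvA_count_step k (L, nd))) = _
    have hstep : pvA_count_step k (L, nd) = (bumpL L nd.1, zzStep k nd) := rfl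
    rw [hstep, ih]
    simp [patA, Function.iterate_succ_apply]

theorem patLoop (k : Int) : ∀ (l : List Int) (pat : List Int) (nd : Int × Int),
    l.foldl (fun st _ => pvB_pat_step k st) (pat, nd)
      = (pat ++ patA k l.length nd, (zzStep k)^[l.length] nd) := by
  intro l
  induction l with
  | nil => intro pat nd; simp [patA]
  | cons x rest ih =>
    intro pat nd
    rw [List.foldl_cons]
    show (rest.foldl (fun st _ => pvB_pat_step k st) (pvB_pat_step k (pat, nd))) = _
    have hstep : pvB_pat_step k (pat, nd) = (pat ++ [nd.1], zzStep k nd) := rfl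
    rw [hstep, ih]
    simp [patA, Function.iterate_succ_apply]

theorem decLoop (k : Int) (zig : List (List Char)) :
    ∀ (l : List Int) (acc : List Char) (idxs : List Int) (nd : Int × Int),
    l.foldl (fun st _ => pvA_dec_step k zig st) (acc, idxs, nd)
      = (acc ++ expandZ (fun r m => PySem.List.pyGetD (PySem.List.pyGetD zig r []) m ' ') (patA k l.length nd) idxs,
         (patA k l.length nd).foldl bumpL idxs, (zzStep k)^[l.length] nd) := by
  intro l
  induction l with
  | nil => intro acc idxs nd; simp [patA, expandZ]
  | cons x rest ih =>
    intro acc idxs nd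
    rw [List.foldl_cons]
    show (rest.foldl (fun st _ => pvA_dec_step k zig st)
      (pvA_dec_step k zig (acc, idxs, nd))) = _
    have hstep : pvA_dec_step k zig (acc, idxs, nd)
        = (acc ++ [PySem.List.pyGetD (PySem.List.pyGetD zig nd.1 []) (PySem.List.pyGetD idxs nd.1 0) ' '],
           bumpL idxs nd.1, zzStep k nd) := rfl
    rw [hstep, ih]
    simp [patA, expandZ, Function.iterate_succ_apply]

-- ==== expandZ: A's replay, element by element ====

theorem expandZ_length (g : Int → Int → Char) :
    ∀ (pat idxs : List Int), (expandZ g pat idxs).length = pat.length := by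
  intro pat
  induction pat with
  | nil => intro idxs; rfl
  | cons r rest ih => intro idxs; simp [expandZ, ih]

theorem getD_bumpL (idxs : List Int) (e : Int) (he : 0 ≤ e ∧ e < (idxs.length : Int)) (p : Int)
    (hp : 0 ≤ p ∧ p < (idxs.length : Int)) :
    PySem.List.pyGetD (bumpL idxs e) p 0
      = if p = e then PySem.List.pyGetD idxs p 0 + 1 else PySem.List.pyGetD idxs p 0 := by
  have hE : e = ((e.toNat : Nat) : Int) := by omega
  have hP : p = ((p.toNat : Nat) : Int) := by omega
  rw [hE, hP]
  simp only [bumpL]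
  rw [PySem.List.pyGetD_pySetD_natCast _ _ _ _ _ (by omega : e.toNat < idxs.length)]
  by_cases hc : p.toNat = e.toNat
  · rw [if_pos hc, if_pos (by omega), hc]
  · rw [if_neg hc, if_neg (by omega)]

theorem expandZ_getElem (g : Int → Int → Char) :
    ∀ (pat idxs : List Int) (hpat : ∀ e ∈ pat, 0 ≤ e ∧ e < (idxs.length : Int))
      (i : Nat) (hi : i < pat.length),
    (expandZ g pat idxs)[i]'(by rw [expandZ_length]; exact hi)
      = g (pat[i]) (PySem.List.pyGetD idxs (pat[i]) 0 + ((pat.take i).count (pat[i]) : Int)) := by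
  intro pat
  induction pat with
  | nil => intro idxs _ i hi; simp at hi
  | cons r rest ih =>
    intro idxs hpat i hi
    match i with
    | 0 => simp [expandZ]
    | (m+1) =>
      have hm : m < rest.length := by simpa using hi
      have hrest : ∀ e ∈ rest, 0 ≤ e ∧ e < ((bumpL idxs r).length : Int) := by
        intro e he
        have := hpat e (by simp [he])
        simpa [bumpL, PySem.List.length_pySetD] using this
      have hLHS : (expandZ g (r :: rest) idxs)[m+1]'(by rw [expandZ_length]; exact hi)
          = (expandZ g rest (bumpL idxs r))[m]'(by rw [expandZ_length]; exact hm) := by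
        simp [expandZ]
      rw [hLHS, ih (bumpL idxs r) hrest m hm]
      have hre := hrest (rest[m]) (by simp)
      have hr := hpat r (by simp)
      rw [getD_bumpL idxs r hr (rest[m]) (by simpa [bumpL, PySem.List.length_pySetD] using hre)]
      have hghistória : ((r :: rest).take (m+1)) = r :: rest.take m := by simp
      rw [show ((r :: rest)[m+1]) = rest[m] from by simp]
      rw [hghistória, List.count_cons]
      by_cases hc : rest[m] = r
      · rw [if_pos hc, if_pos (by rw [beq_iff_eq]; exact hc.symm)]
        congr 1
        push_cast
        ring
      · rw [if_neg hc, if_neg (by rw [beq_iff_eq]; exact fun h => hc h.symm)]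
        congr 1

-- ==== prefix sums of rail counts ====

def offc (c : Nat → Nat) (r : Nat) : Nat := ((List.range r).map c).sum

theorem offc_succ (c : Nat → Nat) (r : Nat) : offc c (r+1) = offc c r + c r := by
  simp [offc, List.range_succ]

theorem countP_lt_succ (x : Int) : ∀ (pat : List Int),
    pat.countP (fun e => decide (e < x + 1))
      = pat.countP (fun e => decide (e < x)) + pat.count x := by
  intro pat
  induction pat with
  | nil => simp
  | cons e rest ih =>
    rw [List.countP_cons, List.countP_cons, List.count_cons, ih]
    by_cases h1 : e < x
    · rw [if_pos (by simp; omega), if_pos (by simp [h1]), if_neg (by simp; omega)]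
      omega
    · by_cases h2 : e = x
      · rw [if_pos (by simp; omega), if_neg (by simp; omega), if_pos (by simp [h2])]
        omega
      · rw [if_neg (by simp; omega), if_neg (by simp [h1]), if_neg (by simp; omega)]
        omega

theorem offc_count (pat : List Int) (h : ∀ e ∈ pat, 0 ≤ e) :
    ∀ (r : Nat), offc (fun r' => pat.count ((r' : Nat) : Int)) r
      = pat.countP (fun e => decide (e < (r : Int))) := by
  intro r
  induction r with
  | zero =>
    simp [offc]
    symm
    rw [List.countP_eq_zero]
    intro e he
    have := h e he
    simp
    omega
  | succ m ih =>
    rw [offc_succ, ih]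
    have : ((m + 1 : Nat) : Int) = ((m : Nat) : Int) + 1 := by push_cast; ring
    rw [this, countP_lt_succ]

-- ==== A's split loop: zigzag[r] is the r-th contiguous segment of the text ====

theorem splitLoop (t : List Char) (L : List Int) (c : Nat → Nat)
    (hL : ∀ r : Nat, r < L.length → PySem.List.pyGetD L (r : Int) 0 = (c r : Int)) :
    ∀ (j : Nat), j ≤ L.length →
    (PySem.List.pyRange 0 (j : Int)).foldl (pvA_split_step t L)
        ((List.range L.length).map (fun _ => []), 0)
      = ((List.range L.length).map
          (fun r => if r < j then (t.drop (offc c r)).take (c r) else []), (offc c j : Int)) := by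
  intro j
  induction j with
  | zero => simp [offc]
  | succ m ih =>
    intro hm
    have hm' : m ≤ L.length := by omega
    have hsplit : PySem.List.pyRange 0 ((m + 1 : Nat) : Int)
        = PySem.List.pyRange 0 (m : Int) ++ [(m : Int)] := by
      have : ((m + 1 : Nat) : Int) = (m : Int) + 1 := by push_cast; ring
      rw [this, PySem.List.pyRange_one_succ_right (by omega)]
    rw [hsplit, List.foldl_append, ih hm']
    simp only [List.foldl_cons, List.foldl_nil]
    unfold pvA_split_step
    dsimp only
    rw [hL m (by omega)]
    have hslice : PySem.List.slice t (some ((offc c m : Nat) : Int))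
        (some (((offc c m : Nat) : Int) + ((c m : Nat) : Int)))
        = (t.drop (offc c m)).take (c m) := by
      have h2 : ((offc c m : Nat) : Int) + ((c m : Nat) : Int) = ((offc c m + c m : Nat) : Int) := by
        push_cast; ring
      rw [h2, PySem.List.slice_natCast]
      congr 1
      omega
    rw [hslice]
    refine Prod.ext ?_ ?_
    · show PySem.List.pySetD _ ((m : Nat) : Int) _ = _
      rw [PySem.List.pySetD_natCast]
      apply List.ext_getElem
      · simp
      · intro j hj1 hj2
        rw [List.getElem_set]
        simp only [List.getElem_map, List.getElem_range]
        by_cases hc : m = j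
        · rw [if_pos hc, if_pos (by omega)]
          subst hc
          rfl
        · rw [if_neg hc]
          by_cases hlt : j < m
          · rw [if_pos hlt, if_pos (by omega)]
          · rw [if_neg hlt, if_neg (by omega)]
    · show ((offc c m : Nat) : Int) + ((c m : Nat) : Int) = _
      rw [offc_succ]
      push_cast
      ring

-- ==== B's grouping loop: bucket r collects the indices whose rail is r, in order ====

def Gb (pat : List Int) (j0 : Int) (r : Int) : List Int :=
  ((PySem.List.enumerate pat j0).filter (fun p => p.2 == r)).map (·.1)

theorem getD_pySetD_nat {α : Type} (xs : List α) (m : Nat) (hm : m < xs.length) (v : α)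
    (i : Nat) (d : α) :
    (PySem.List.pySetD xs ((m : Nat) : Int) v).getD i d = if i = m then v else xs.getD i d := by
  rw [PySem.List.pySetD_natCast]
  rw [List.getD_eq_getElem?_getD, List.getD_eq_getElem?_getD, List.getElem?_set]
  by_cases hc : i = m
  · rw [if_pos hc, if_pos hc.symm, if_pos (by omega)]
    rfl
  · rw [if_neg hc, if_neg (fun h => hc h.symm)]

theorem Gb_nil (j0 : Int) (r : Int) : Gb [] j0 r = [] := by
  simp [Gb, PySem.List.enumerate_nil]

theorem Gb_cons (e : Int) (rest : List Int) (j0 : Int) (r : Int) :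
    Gb (e :: rest) j0 r = (if e = r then [j0] else []) ++ Gb rest (j0 + 1) r := by
  simp only [Gb, PySem.List.enumerate_cons, List.filter_cons]
  by_cases hc : e = r
  · rw [if_pos (by simpa using hc), if_pos hc]
    simp
  · rw [if_neg (by simpa using hc), if_neg hc]
    simp

theorem bucketLoop : ∀ (pat : List Int) (j0 : Int) (B : List (List Int))
    (hpat : ∀ e ∈ pat, 0 ≤ e ∧ e < (B.length : Int)),
    (PySem.List.enumerate pat j0).foldl pvB_bucket_step B
      = (List.range B.length).map (fun r => B.getD r [] ++ Gb pat j0 ((r : Nat) : Int)) := by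
  intro pat
  induction pat with
  | nil =>
    intro j0 B _
    rw [PySem.List.enumerate_nil]
    apply List.ext_getElem
    · simp
    · intro i h1 h2
      have : i < B.length := by simpa using h2
      simp [Gb_nil, List.getD_eq_getElem?_getD, List.getElem?_eq_getElem this]
  | cons e rest ih =>
    intro j0 B hpat
    have he := hpat e (by simp)
    have hE : e = ((e.toNat : Nat) : Int) := by omega
    rw [PySem.List.enumerate_cons, List.foldl_cons]
    have hB' : pvB_bucket_step B (j0, e)
        = PySem.List.pySetD B e (PySem.List.pyGetD B e [] ++ [j0]) := rfl
    rw [hB', ih (j0 + 1) _ (by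
      intro x hx
      have := hpat x (by simp [hx])
      simpa [PySem.List.length_pySetD] using this)]
    apply List.ext_getElem
    · simp [PySem.List.length_pySetD]
    · intro i h1 h2
      simp only [List.getElem_map, List.getElem_range, PySem.List.length_pySetD] at h1 h2 ⊢
      have hlen : i < B.length := by simpa using h2
      rw [hE, getD_pySetD_nat B e.toNat (by omega) _ i []]
      rw [Gb_cons]
      by_cases hc : i = e.toNat
      · rw [if_pos hc, if_pos (by omega)]
        have hBe : PySem.List.pyGetD B ((e.toNat : Nat) : Int) [] = B.getD i [] := by
          rw [PySem.List.pyGetD_natCast, hc]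
        rw [hBe, List.append_assoc]
      · rw [if_neg hc, if_neg (by omega)]
        simp

-- ==== B's scatter loop ====

theorem scatterLoop_length (t : List Char) : ∀ (l : List (Int × Int)) (R : List (List Char)),
    (l.foldl (pvB_scatter_step t) R).length = R.length := by
  intro l
  induction l with
  | nil => intro R; rfl
  | cons p rest ih =>
    intro R
    rw [List.foldl_cons]
    rw [ih]
    simp [pvB_scatter_step, PySem.List.length_pySetD]

theorem scatterLoop (t : List Char) : ∀ (ord : List Int) (j0 : Int) (R : List (List Char))
    (hnd : ord.Nodup) (hmem : ∀ x ∈ ord, 0 ≤ x ∧ x < (R.length : Int))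
    (i : Nat) (hi : i < R.length),
    ((PySem.List.enumerate ord j0).foldl (pvB_scatter_step t) R).getD i []
      = if (i : Int) ∈ ord
        then [PySem.List.pyGetD t (j0 + ((ord.idxOf (i : Int) : Nat) : Int)) ' ']
        else R.getD i [] := by
  intro ord
  induction ord with
  | nil =>
    intro j0 R _ _ i hi
    rw [PySem.List.enumerate_nil]
    simp
  | cons o rest ih =>
    intro j0 R hnd hmem i hi
    have ho := hmem o (by simp)
    have hO : o = ((o.toNat : Nat) : Int) := by omega
    rw [PySem.List.enumerate_cons, List.foldl_cons]
    have hR1 : pvB_scatter_step t R (j0, o)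
        = PySem.List.pySetD R o [PySem.List.pyGetD t j0 ' '] := rfl
    rw [hR1]
    rw [ih (j0 + 1) _ hnd.of_cons (by
      intro x hx
      have := hmem x (by simp [hx])
      simpa [PySem.List.length_pySetD] using this) i (by simpa [PySem.List.length_pySetD] using hi)]
    have honot : o ∉ rest := (List.nodup_cons.mp hnd).1
    by_cases hc : (i : Int) ∈ rest
    · rw [if_pos hc, if_pos (by simp [hc])]
      have hne : (i : Int) ≠ o := fun h => honot (h ▸ hc)
      rw [List.idxOf_cons_ne _ (fun h => hne h.symm)]
      congr 1
      push_cast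
      ring
    · rw [if_neg hc]
      rw [hO, getD_pySetD_nat R o.toNat (by omega) _ i []]
      by_cases hio : i = o.toNat
      · rw [if_pos hio, if_pos (List.mem_cons.mpr (Or.inl (by omega)))]
        have hio' : (i : Int) = o := by omega
        rw [hio', ← hO, List.idxOf_cons_self]
        simp
      · rw [if_neg hio, if_neg (by
          intro hmem2
          rcases List.mem_cons.mp hmem2 with h | h
          · exact hio (by omega)
          · exact hc h)]

-- ==== properties of the buckets ====

theorem length_Gb (r : Int) : ∀ (pat : List Int) (j0 : Int),
    (Gb pat j0 r).length = pat.count r := by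
  intro pat
  induction pat with
  | nil => intro j0; simp [Gb_nil]
  | cons e rest ih =>
    intro j0
    rw [Gb_cons, List.count_cons, List.length_append, ih]
    by_cases hc : e = r
    · rw [if_pos hc, if_pos (by simp [hc])]
      simp
      omega
    · rw [if_neg hc, if_neg (by simp [beq_iff_eq]; tauto)]
      simp

theorem mem_Gb (r : Int) : ∀ (pat : List Int) (j0 : Int) (x : Int),
    x ∈ Gb pat j0 r ↔ ∃ (m : Nat), ∃ (hm : m < pat.length), x = j0 + m ∧ pat[m] = r := by
  intro pat
  induction pat with
  | nil => intro j0 x; simp [Gb_nil]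
  | cons e rest ih =>
    intro j0 x
    rw [Gb_cons]
    simp only [List.mem_append, ih]
    constructor
    · rintro (h | ⟨m, hm, rfl, hp⟩)
      · by_cases hc : e = r
        · rw [if_pos hc] at h
          simp at h
          exact ⟨0, by simp, by omega, by simpa using hc⟩
        · rw [if_neg hc] at h
          simp at h
      · exact ⟨m + 1, by simpa using hm, by push_cast; ring, by simpa using hp⟩
    · rintro ⟨m, hm, rfl, hp⟩
      match m with
      | 0 =>
        left
        rw [if_pos (by simpa using hp)]
        simp
      | (m'+1) =>
        right
        refine ⟨m', by simpa using hm, by push_cast; ring, by simpa using hp⟩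

theorem idxOf_Gb (r : Int) : ∀ (pat : List Int) (j0 : Int) (m : Nat) (hm : m < pat.length),
    pat[m] = r → (Gb pat j0 r).idxOf (j0 + (m : Int)) = (pat.take m).count r := by
  intro pat
  induction pat with
  | nil => intro j0 m hm; simp at hm
  | cons e rest ih =>
    intro j0 m hm hp
    rw [Gb_cons]
    match m with
    | 0 =>
      have he : e = r := by simpa using hp
      rw [if_pos he]
      simp
    | (m'+1) =>
      have hm' : m' < rest.length := by simpa using hm
      have hp' : rest[m'] = r := by simpa using hp
      have harith : j0 + ((m' + 1 : Nat) : Int) = (j0 + 1) + (m' : Int) := by push_cast; ring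
      by_cases hc : e = r
      · rw [if_pos hc]
        simp only [List.singleton_append]
        have hne : j0 + ((m' + 1 : Nat) : Int) ≠ j0 := by push_cast; omega
        rw [List.idxOf_cons_ne _ (fun h => hne h.symm), harith, ih (j0 + 1) m' hm' hp']
        rw [List.take_succ_cons, List.count_cons, if_pos (by simp [hc])]
      · rw [if_neg hc]
        simp only [List.nil_append]
        rw [harith, ih (j0 + 1) m' hm' hp']
        rw [List.take_succ_cons, List.count_cons, if_neg (by simp [beq_iff_eq]; tauto)]
        omega

theorem nodup_Gb (pat : List Int) (j0 : Int) (r : Int) : (Gb pat j0 r).Nodup := by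
  have hpw : (Gb pat j0 r).Pairwise (· < ·) := by
    unfold Gb
    rw [List.pairwise_map]
    exact (PySem.List.pairwise_lt_enumerate pat j0).filter _
  exact hpw.imp (fun h => ne_of_lt h)

-- ==== the full read order: buckets concatenated ====

def ordL (pat : List Int) (k' : Nat) : List Int :=
  ((List.range k').map (fun r => Gb pat 0 ((r : Nat) : Int))).flatten

theorem mem_ordL (pat : List Int) (k' : Nat) (hpat : ∀ e ∈ pat, 0 ≤ e ∧ e < (k' : Int)) (x : Int) :
    x ∈ ordL pat k' ↔ ∃ (m : Nat), ∃ (_ : m < pat.length), x = (m : Int) := by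
  unfold ordL
  rw [List.mem_flatten]
  constructor
  · rintro ⟨l, hl, hx⟩
    rw [List.mem_map] at hl
    obtain ⟨r, _, rfl⟩ := hl
    obtain ⟨m, hm, rfl, _⟩ := (mem_Gb _ pat 0 x).mp hx
    exact ⟨m, hm, by omega⟩
  · rintro ⟨m, hm, rfl⟩
    have hpm := hpat (pat[m]) (by simp)
    refine ⟨Gb pat 0 pat[m], ?_, ?_⟩
    · rw [List.mem_map]
      refine ⟨pat[m].toNat, List.mem_range.mpr (by omega), by congr 1; omega⟩
    · exact (mem_Gb _ pat 0 _).mpr ⟨m, hm, by omega, rfl⟩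

theorem nodup_ordL (pat : List Int) (k' : Nat) : (ordL pat k').Nodup := by
  unfold ordL
  rw [List.nodup_flatten]
  constructor
  · intro l hl
    rw [List.mem_map] at hl
    obtain ⟨r, _, rfl⟩ := hl
    exact nodup_Gb pat 0 _
  · rw [List.pairwise_map]
    refine (List.pairwise_lt_range).imp ?_
    intro a b hab x hxa hxb
    obtain ⟨m, hm, hxm, hpa⟩ := (mem_Gb _ pat 0 x).mp hxa
    obtain ⟨m', hm', hxm', hpb⟩ := (mem_Gb _ pat 0 x).mp hxb
    have : m = m' := by omega
    subst this
    rw [hpa] at hpb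
    omega

theorem idxOf_ordL (pat : List Int) (k' : Nat) (hpat : ∀ e ∈ pat, 0 ≤ e ∧ e < (k' : Int))
    (i : Nat) (hi : i < pat.length) :
    (ordL pat k').idxOf (i : Int)
      = pat.countP (fun e => decide (e < pat[i])) + (pat.take i).count (pat[i]) := by
  have hpi := hpat (pat[i]) (by simp)
  set r0 : Nat := pat[i].toNat with hr0
  have hr0i : ((r0 : Nat) : Int) = pat[i] := by omega
  have hk : k' = r0 + ((k' - r0 - 1) + 1) := by omega
  have hranges : List.range k'
      = List.range r0 ++ (r0 :: ((List.range (k' - r0 - 1)).map (fun x => r0 + 1 + x))) := by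
    conv_lhs => rw [hk]
    rw [List.range_add, List.range_succ_eq_map]
    simp only [List.map_cons, List.map_map, Nat.add_zero]
    congr 1
    congr 1
    apply List.map_congr_left
    intro a _
    simp only [Function.comp_apply]
    omega
  have hmemG : (i : Int) ∈ Gb pat 0 ((r0 : Nat) : Int) :=
    (mem_Gb _ pat 0 _).mpr ⟨i, hi, by omega, hr0i.symm⟩
  unfold ordL
  rw [hranges, List.map_append, List.flatten_append, List.map_cons, List.flatten_cons]
  have hnotmem : (i : Int) ∉ ((List.range r0).map (fun r => Gb pat 0 ((r : Nat) : Int))).flatten := by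
    intro hmem
    rw [List.mem_flatten] at hmem
    obtain ⟨l, hl, hx⟩ := hmem
    rw [List.mem_map] at hl
    obtain ⟨r, hr, rfl⟩ := hl
    rw [List.mem_range] at hr
    obtain ⟨m, hm, hxm, hpm⟩ := (mem_Gb _ pat 0 _).mp hx
    have hmi : m = i := by omega
    subst hmi
    omega
  rw [List.idxOf_append, if_neg hnotmem]
  rw [List.idxOf_append, if_pos hmemG]
  have hidx : (Gb pat 0 ((r0 : Nat) : Int)).idxOf ((i : Nat) : Int) = (pat.take i).count pat[i] := by
    have := idxOf_Gb (((r0 : Nat) : Int)) pat 0 i hi hr0i.symm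
    rw [zero_add] at this
    rw [this, hr0i]
  rw [hidx]
  have hlenfl : (((List.range r0).map (fun r => Gb pat 0 ((r : Nat) : Int))).flatten).length
      = pat.countP (fun e => decide (e < pat[i])) := by
    rw [List.length_flatten, List.map_map]
    have hmapeq : ((List.range r0).map (List.length ∘ fun r => Gb pat 0 ((r : Nat) : Int)))
        = ((List.range r0).map (fun r => pat.count ((r : Nat) : Int))) := by
      apply List.map_congr_left
      intro a _
      simp [Function.comp, length_Gb]
    rw [hmapeq]
    have hoc := offc_count pat (fun e he => (hpat e he).1) r0
    rw [offc] at hoc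
    rw [hoc, hr0i]
  rw [hlenfl]
  ring

-- ==== list-of-one-character-strings utilities (B keeps a list of 1-char strings) ====

theorem flatten_map_singleton {α β : Type} (f : α → β) : ∀ (l : List α),
    (l.map (fun i => [f i])).flatten = l.map f := by
  intro l
  induction l with
  | nil => rfl
  | cons a l ih => simp_all

theorem flatten_take_singletons : ∀ (R : List (List Char)) (hR : ∀ x ∈ R, x.length = 1) (m : Nat),
    (R.take m).flatten = R.flatten.take m := by
  intro R
  induction R with
  | nil => intro _ m; simp
  | cons x rest ih =>
    intro hR m
    match m with
    | 0 => simp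
    | (m'+1) =>
      have hx := hR x (by simp)
      match x, hx with
      | [c], _ =>
        simp only [List.take_succ_cons, List.flatten_cons, List.singleton_append,
          List.take_succ_cons]
        rw [ih (fun y hy => hR y (by simp [hy])) m']

theorem flatten_drop_singletons : ∀ (R : List (List Char)) (hR : ∀ x ∈ R, x.length = 1) (m : Nat),
    (R.drop m).flatten = R.flatten.drop m := by
  intro R
  induction R with
  | nil => intro _ m; simp
  | cons x rest ih =>
    intro hR m
    match m with
    | 0 => simp
    | (m'+1) =>
      have hx := hR x (by simp)
      match x, hx with
      | [c], _ =>
        simp only [List.drop_succ_cons, List.flatten_cons, List.singleton_append,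
          List.drop_succ_cons]
        rw [ih (fun y hy => hR y (by simp [hy])) m']

theorem length_flatten_singletons (R : List (List Char)) (hR : ∀ x ∈ R, x.length = 1) :
    R.flatten.length = R.length := by
  rw [List.length_flatten]
  induction R with
  | nil => rfl
  | cons x rest ih =>
    have hx := hR x (by simp)
    simp only [List.map_cons, List.sum_cons, hx, List.length_cons]
    rw [ih (fun y hy => hR y (by simp [hy]))]
    omega

theorem insert_clamped {α : Type} (R : List α) (p : Int) (hp : 0 ≤ p) (v : α) :
    PySem.List.insert R p v
      = R.take (min p.toNat R.length) ++ v :: R.drop (min p.toNat R.length) := by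
  unfold PySem.List.insert PySem.List.sliceIndices
  simp only []
  rw [if_neg (by omega), if_neg (by omega)]
  have hmin : (min p (R.length:Int)).toNat = min p.toNat R.length := by
    rcases le_total p (R.length:Int) with h | h
    · rw [min_eq_left h, min_eq_left (by omega)]
    · rw [min_eq_right h, min_eq_right (by omega)]
      omega
  rw [hmin]

-- one space reinsertion step: A's string splice = B's list insert, through flatten
theorem space_step (R : List (List Char)) (hR : ∀ x ∈ R, x.length = 1) (p : Int) (hp : 0 ≤ p) :
    (PySem.List.insert R p [' ']).flatten
      = PySem.List.slice R.flatten none (some p) ++ [' ']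
        ++ PySem.List.slice R.flatten (some p) none := by
  rw [insert_clamped R p hp, PySem.List.slice_to _ hp, PySem.List.slice_from _ hp]
  rw [List.flatten_append, List.flatten_cons]
  rw [flatten_take_singletons R hR, flatten_drop_singletons R hR]
  have hlen : R.flatten.length = R.length := length_flatten_singletons R hR
  by_cases hc : p.toNat ≤ R.length
  · rw [show min p.toNat R.length = p.toNat by omega]
    simp
  · rw [show min p.toNat R.length = R.length by omega]
    rw [List.take_of_length_le (by omega), List.take_of_length_le (by omega),
        List.drop_of_length_le (by omega), List.drop_of_length_le (by omega)]
    simp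

theorem spaces_fold : ∀ (P : List Int) (hP : ∀ p ∈ P, 0 ≤ p) (R : List (List Char))
    (hR : ∀ x ∈ R, x.length = 1),
    P.foldl (fun r pos => PySem.List.slice r none (some pos) ++ [' ']
      ++ PySem.List.slice r (some pos) none) R.flatten
      = (P.foldl (fun r pos => PySem.List.insert r pos [' ']) R).flatten := by
  intro P
  induction P with
  | nil => intro _ R _; rfl
  | cons p rest ih =>
    intro hP R hR
    rw [List.foldl_cons, List.foldl_cons]
    rw [← space_step R hR p (hP p (by simp))]
    rw [ih (fun x hx => hP x (by simp [hx])) (PySem.List.insert R p [' '])]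
    intro x hx
    rw [insert_clamped R p (hP p (by simp))] at hx
    rcases List.mem_append.mp hx with h | h
    · exact hR x (List.mem_of_mem_take h)
    · rcases List.mem_cons.mp h with rfl | h
      · rfl
      · exact hR x (List.mem_of_mem_drop h)

-- ==== text.replace(' ', '') removes exactly the spaces ====

theorem replace_go_space : ∀ (fuel : Nat) (l acc : List Char), l.length ≤ fuel →
    PySem.Chars.replace.go [' '] [] fuel l acc
      = acc.reverse ++ l.filter (fun c => c ≠ ' ') := by
  intro fuel
  induction fuel with
  | zero =>
    intro l acc hl
    have : l = [] := by
      cases l with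
      | nil => rfl
      | cons a t => simp at hl
    subst this
    simp [PySem.Chars.replace.go]
  | succ m ih =>
    intro l acc hl
    cases l with
    | nil => simp [PySem.Chars.replace.go]
    | cons c t =>
      rw [PySem.Chars.replace.go]
      by_cases hc : c = ' '
      · rw [if_pos (by simp [List.isPrefixOf, hc])]
        simp only [List.length_cons, List.length_nil, List.drop_succ_cons, List.drop_zero,
          List.reverse_nil, List.nil_append]
        rw [ih t acc (by simpa using hl)]
        simp [List.filter_cons, hc]
      · rw [if_neg (by simp [List.isPrefixOf]; exact fun h => hc h.symm)]
        rw [ih t (c :: acc) (by simpa using hl)]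
        simp [List.filter_cons, hc]

theorem replace_space_eq_filter (cs : List Char) :
    PySem.Chars.replace cs [' '] [] = cs.filter (fun c => c ≠ ' ') := by
  rw [PySem.Chars.replace]
  rw [if_neg (by simp)]
  rw [replace_go_space cs.length cs [] le_rfl]
  simp

theorem replace_space_all (cs : List Char) (h : ∀ c ∈ cs, c = ' ') :
    PySem.Chars.replace cs [' '] [] = [] := by
  rw [replace_space_eq_filter, List.filter_eq_nil_iff]
  intro c hc
  simp [h c hc]

-- ==== strict prefix-count ====

theorem count_take_lt (l : List Int) (i : Nat) (h : i < l.length) :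
    (l.take i).count l[i] < l.count l[i] := by
  obtain ⟨a, ha⟩ : ∃ a, l[i] = a := ⟨_, rfl⟩
  rw [ha]
  conv_rhs => rw [← List.take_append_drop i l]
  rw [List.count_append, List.drop_eq_getElem_cons h, ha, List.count_cons]
  simp

-- ==== where cipher character number q ends up: the common destination formula ====

def destN (pat : List Int) (i : Nat) : Nat :=
  pat.countP (fun e => decide (e < pat.getD i 0)) + (pat.take i).count (pat.getD i 0)

theorem offc_destN (pat : List Int) (hnn : ∀ e ∈ pat, 0 ≤ e) (i : Nat) (hi : i < pat.length) :
    offc (fun x => pat.count ((x : Nat) : Int)) (pat[i].toNat) + (pat.take i).count pat[i]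
      = destN pat i := by
  unfold destN
  rw [List.getD_eq_getElem pat 0 hi]
  rw [offc_count pat hnn]
  have hx : ((pat[i].toNat : Nat) : Int) = pat[i] := by
    have := hnn (pat[i]) (by simp)
    omega
  rw [hx]

-- A's decode characters, fully evaluated
theorem A_side (t : List Char) (k' : Nat) (pat : List Int)
    (hlen : pat.length = t.length)
    (hmem : ∀ e ∈ pat, 0 ≤ e ∧ e < (k' : Int)) :
    expandZ (fun r m => PySem.List.pyGetD (PySem.List.pyGetD
        ((List.range k').map
          (fun r' => (t.drop (offc (fun x => pat.count ((x : Nat) : Int)) r')).take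
            (pat.count ((r' : Nat) : Int)))) r [])
        m ' ')
      pat (List.replicate k' 0)
    = (List.range t.length).map (fun i => t.getD (destN pat i) ' ') := by
  apply List.ext_getElem
  · rw [expandZ_length]
    simp [hlen]
  · intro i h1 h2
    have hip : i < pat.length := by rw [expandZ_length] at h1; exact h1
    have hpi := hmem (pat[i]) (by simp)
    rw [expandZ_getElem _ pat _ (by simpa using hmem) i hip]
    have hrep : PySem.List.pyGetD (List.replicate k' (0 : Int)) (pat[i]) 0 = 0 := by
      rw [show pat[i] = ((pat[i].toNat : Nat) : Int) by omega, PySem.List.pyGetD_natCast]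
      rcases Nat.lt_or_ge pat[i].toNat k' with h | h
      · rw [List.getD_eq_getElem _ _ (by simpa using h)]
        simp
      · rw [List.getD_eq_default _ _ (by simpa using h)]
    rw [hrep, zero_add]
    -- outer lookup: the bucket of rail pat[i]
    have houter : PySem.List.pyGetD
        ((List.range k').map
          (fun r' => (t.drop (offc (fun x => pat.count ((x : Nat) : Int)) r')).take
            (pat.count ((r' : Nat) : Int)))) (pat[i]) []
        = (t.drop (offc (fun x => pat.count ((x : Nat) : Int)) (pat[i].toNat))).take
            (pat.count ((pat[i].toNat : Nat) : Int)) := by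
      rw [show pat[i] = ((pat[i].toNat : Nat) : Int) by omega, PySem.List.pyGetD_natCast]
      rw [List.getD_eq_getElem _ _ (by simp; omega)]
      simp only [List.getElem_map, List.getElem_range]
      rw [show (((pat[i].toNat : Nat) : Int)).toNat = pat[i].toNat from by omega]
    rw [houter]
    -- inner lookup: position (take i).count pat[i] within that bucket
    have hcast : pat[i] = ((pat[i].toNat : Nat) : Int) := by omega
    have hcnt : (pat.take i).count pat[i] < pat.count ((pat[i].toNat : Nat) : Int) := by
      rw [← hcast]
      exact count_take_lt pat i hip
    have hsum : offc (fun x => pat.count ((x : Nat) : Int)) (pat[i].toNat)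
        + pat.count ((pat[i].toNat : Nat) : Int) ≤ pat.length := by
      rw [offc_count pat (fun e he => (hmem e he).1), ← hcast]
      have h2 := countP_lt_succ (pat[i]) pat
      have h3 := List.countP_le_length (l := pat) (p := fun e => decide (e < pat[i] + 1))
      omega
    have hbound : offc (fun x => pat.count ((x : Nat) : Int)) (pat[i].toNat)
        + (pat.take i).count pat[i] < t.length := by omega
    have hinner : PySem.List.pyGetD
        ((t.drop (offc (fun x => pat.count ((x : Nat) : Int)) (pat[i].toNat))).take
          (pat.count ((pat[i].toNat : Nat) : Int)))
        (((pat.take i).count pat[i] : Nat) : Int) ' '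
        = t.getD (destN pat i) ' ' := by
      rw [PySem.List.pyGetD_natCast]
      have hlt : (pat.take i).count pat[i]
          < ((t.drop (offc (fun x => pat.count ((x : Nat) : Int)) (pat[i].toNat))).take
            (pat.count ((pat[i].toNat : Nat) : Int))).length := by
        simp only [List.length_take, List.length_drop]
        omega
      rw [List.getD_eq_getElem _ _ hlt]
      rw [List.getElem_take, List.getElem_drop]
      rw [List.getD_eq_getElem _ _ (by rw [← offc_destN pat (fun e he => (hmem e he).1) i hip]; omega)]
      congr 1
      rw [← offc_destN pat (fun e he => (hmem e he).1) i hip]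
    rw [← hcast] at hinner ⊢
    rw [hinner]
    rw [List.getElem_map, List.getElem_range]

-- B's scatter result, fully evaluated
theorem B_side (t : List Char) (k' : Nat) (pat : List Int)
    (hlen : pat.length = t.length)
    (hmem : ∀ e ∈ pat, 0 ≤ e ∧ e < (k' : Int)) :
    (PySem.List.enumerate (ordL pat k') 0).foldl (pvB_scatter_step t) (List.replicate t.length [])
      = (List.range t.length).map (fun i => [t.getD (destN pat i) ' ']) := by
  apply List.ext_getElem
  · rw [scatterLoop_length]
    simp
  · intro i h1 h2
    have hi : i < t.length := by rw [scatterLoop_length] at h1; simpa using h1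
    have hgetD : ∀ (X : List (List Char)) (hx : i < X.length), X[i]'hx = X.getD i [] := by
      intro X hx
      rw [List.getD_eq_getElem _ _ hx]
    rw [hgetD _ h1, hgetD _ (by simpa using h2)]
    rw [scatterLoop t (ordL pat k') 0 _ (nodup_ordL pat k')
      (by
        intro x hx
        obtain ⟨m, hm, rfl⟩ := (mem_ordL pat k' hmem x).mp hx
        constructor
        · omega
        · simp only [List.length_replicate]
          omega)
      i (by simp only [List.length_replicate]; exact hi)]
    rw [if_pos ((mem_ordL pat k' hmem (i : Int)).mpr ⟨i, by omega, rfl⟩)]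
    rw [idxOf_ordL pat k' hmem i (by omega)]
    rw [List.getD_eq_getElem ((List.range t.length).map
      (fun i => [t.getD (destN pat i) ' '])) [] (by simpa using hi)]
    rw [List.getElem_map, List.getElem_range]
    rw [zero_add, PySem.List.pyGetD_natCast]
    congr 1
    unfold destN
    rw [List.getD_eq_getElem pat 0 (by omega)]

-- the recorded space positions are nonnegative
theorem positions_nonneg (cs : List Char) :
    ∀ p ∈ (PySem.List.enumerate cs 0).foldl
      (fun acc q => if q.2 = ' ' then acc ++ [q.1] else acc) [], (0:Int) ≤ p := by
  intro p hp
  simp only [PySem.List.foldl_append_ite, List.nil_append, List.mem_map] at hp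
  obtain ⟨q, hq, rfl⟩ := hp
  have := List.mem_filter.mp hq
  obtain ⟨m, hm, rfl⟩ := (PySem.List.mem_enumerate_iff cs 0 q).mp this.1
  simp

-- ==== main theorem ====

theorem dechiffre_zigzag_spec : Claim_equal_dechiffre_zigzag := by
  intro s k _ hpre
  unfold Spec_dechiffre_zigzag dechiffre_zigzag dechiffre_zigzag_alt
  by_cases hk1 : k = 1
  · rw [if_pos hk1, if_pos hk1]
  rw [if_neg hk1, if_neg hk1]
  dsimp only
  set cs := s.toList with hcs
  set t := PySem.Chars.replace cs [' '] [] with ht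
  set P := (PySem.List.enumerate cs 0).foldl
    (fun acc p => if p.2 = ' ' then acc ++ [p.1] else acc) ([] : List Int) with hPdef
  have hPnn : ∀ p ∈ P, (0:Int) ≤ p := positions_nonneg cs
  have hlenR : (PySem.List.pyRange 0 (t.length : Int)).length = t.length := by
    rw [PySem.List.length_pyRange_one]
    omega
  by_cases hk2 : 2 ≤ k
  · -- k ≥ 2 : the zigzag actually runs
    have hkk : ((k.toNat : Nat) : Int) = k := by omega
    set n := t.length with hn
    set pat := patA k n (0, 1) with hpat
    have hmem : ∀ e ∈ pat, 0 ≤ e ∧ e < k := by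
      intro e he
      exact patA_mem k hk2 n (0, 1) (by norm_num) (by norm_num; omega) (by norm_num) e he
    have hmem' : ∀ e ∈ pat, 0 ≤ e ∧ e < ((k.toNat : Nat) : Int) := by
      intro e he
      rw [hkk]
      exact hmem e he
    have hplen : pat.length = n := patA_length k n (0, 1)
    -- A: counting loop
    rw [countLoop k _ _ (0, 1)]
    rw [hlenR, ← hpat]
    set L := pat.foldl bumpL (List.replicate k.toNat 0) with hL
    have hLlen : L.length = k.toNat := by
      rw [hL, length_foldl_bumpL, List.length_replicate]
    have hLr : ∀ r : Nat, r < L.length → PySem.List.pyGetD L ((r : Nat) : Int) 0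
        = ((pat.count ((r : Nat) : Int) : Nat) : Int) := by
      intro r hr
      have hrk : r < k.toNat := by rw [← hLlen]; exact hr
      rw [hL, getD_foldl_bumpL pat _ (by rw [List.length_replicate]; exact hmem') r
        (by rw [List.length_replicate]; exact hrk)]
      rw [PySem.List.pyGetD_natCast, List.getD_replicate, zero_add]
      exact hrk
    -- A: split loop
    have hkr : PySem.List.pyRange 0 k = PySem.List.pyRange 0 ((k.toNat : Nat) : Int) := by
      rw [hkk]
    rw [hkr]
    have hz0 : (PySem.List.pyRange 0 ((k.toNat : Nat) : Int)).map (fun _ => ([] : List Char))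
        = (List.range L.length).map (fun _ => []) := by
      apply List.ext_getElem
      · simp [PySem.List.length_pyRange_one, hLlen]
        omega
      · intro i h1 h2
        simp
    rw [hz0]
    rw [splitLoop t L (fun x => pat.count ((x : Nat) : Int)) hLr k.toNat (le_of_eq hLlen.symm)]
    dsimp only
    have hzigmap : (List.range L.length).map
        (fun r => if r < k.toNat
          then (t.drop (offc (fun x => pat.count ((x : Nat) : Int)) r)).take
            (pat.count ((r : Nat) : Int)) else [])
        = (List.range k.toNat).map
          (fun r => (t.drop (offc (fun x => pat.count ((x : Nat) : Int)) r)).take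
            (pat.count ((r : Nat) : Int))) := by
      rw [hLlen]
      apply List.map_congr_left
      intro a ha
      rw [if_pos (List.mem_range.mp ha)]
    rw [hzigmap]
    -- A: replay loop
    rw [decLoop k _ _ _ _ (0, 1)]
    rw [hlenR, ← hpat]
    dsimp only
    rw [A_side t k.toNat pat (by rw [hplen]) hmem']
    -- B: pattern loop
    rw [patLoop k _ _ (0, 1)]
    rw [hlenR, ← hpat]
    dsimp only
    simp only [List.nil_append]
    -- B: grouping loop
    rw [bucketLoop pat 0 _ (by
      intro e he
      have := hmem e he
      constructor
      · omega
      · simp [PySem.List.length_pyRange_one]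
        omega)]
    have hbuckets : (List.range ((PySem.List.pyRange 0 ((k.toNat : Nat) : Int)).map
          (fun _ => ([] : List Int))).length).map
        (fun r => ((PySem.List.pyRange 0 ((k.toNat : Nat) : Int)).map
          (fun _ => ([] : List Int))).getD r [] ++ Gb pat 0 ((r : Nat) : Int))
        = (List.range k.toNat).map (fun r => Gb pat 0 ((r : Nat) : Int)) := by
      have hblen : ((PySem.List.pyRange 0 ((k.toNat : Nat) : Int)).map
          (fun _ => ([] : List Int))).length = k.toNat := by
        simp [PySem.List.length_pyRange_one]
        omega
      rw [hblen]
      apply List.map_congr_left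
      intro a ha
      rw [List.getD_eq_getElem _ _ (by
        simp [PySem.List.length_pyRange_one]
        have := List.mem_range.mp ha
        omega)]
      simp
    rw [hbuckets]
    -- B: order = the buckets concatenated
    rw [PySem.List.foldl_append_eq_flatten, List.nil_append]
    rw [show ((List.range k.toNat).map (fun r => Gb pat 0 ((r : Nat) : Int))).flatten
      = ordL pat k.toNat from rfl]
    -- B: scatter loop
    rw [show List.replicate n ([] : List Char) = List.replicate t.length [] from rfl]
    rw [B_side t k.toNat pat (by rw [hplen]) hmem']
    -- spaces go back in, on both representations
    rw [← flatten_map_singleton (fun i => t.getD (destN pat i) ' ') (List.range t.length)]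
    rw [spaces_fold P hPnn _ (by
      intro x hx
      rw [List.mem_map] at hx
      obtain ⟨a, _, rfl⟩ := hx
      rfl)]
  · -- k ≤ 0 : the text is all spaces, nothing to decode
    have hk0 : k ≤ 0 := by omega
    have hall : ∀ c ∈ cs, c = ' ' := by
      rcases hpre with h1 | h2
      · omega
      · exact h2
    have hteq : t = [] := by
      rw [ht]
      exact replace_space_all cs hall
    have hnil : PySem.List.pyRange 0 (t.length : Int) = [] := by
      rw [hteq]
      rfl
    have hknil : PySem.List.pyRange 0 k = [] := PySem.List.pyRange_one_eq_nil hk0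
    rw [hnil, hknil, hteq]
    simp only [List.foldl_nil, List.map_nil, List.replicate_zero, List.length_nil,
      PySem.List.enumerate_nil]
    have hsp := spaces_fold P hPnn [] (by intro x hx; simp at hx)
    rw [List.flatten_nil] at hsp
    rw [hsp]
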